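-- pv_equiv track=rewrite | github.com/eijnehc/XMongo | src/axes/only_child_axes_with_condition.py | projection_filter_substr
-- ===== SOURCE A (Python) =====
-- def flatten_list(string, recursion_counter = 0, output_list = []):
--     #Initial conditions:
--     count_left_bracket_condition = 0
--     count_right_bracket_condition = 0
--     left_sub_str = ''
--
--     #traverse the string
--     for index, s_value in enumerate(string):
--         if s_value == "[":
--             count_left_bracket_condition += 1
--             break
--         if s_value == "]":
--             count_right_bracket_condition += 1
--             break
--         if count_left_bracket_condition > 0 or count_right_bracket_condition > 0:
--             break
--
--         left_sub_str = left_sub_str + s_value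
--
--     if left_sub_str not in output_list and left_sub_str != '':
--         output_list.append(left_sub_str)
--
--     #Base case if there is no [ then return string
--     if count_left_bracket_condition == count_right_bracket_condition:
--
--         return output_list
--
--     # Case1 where there is left bracket but no right bracket
--     if count_left_bracket_condition > count_right_bracket_condition:
--         sub_str_after_left_bracket = string[index+1:]
--
--         # pass the remaining sub_str_after_left_bracket into the function
--         # sub_str_after_left_recur_res = recursion_test (sub_str_after_left_bracket)
--
--         # Note what is the difference between the 2 lines of return?
--         # Observe that if the list contains a /sth, that sth is the last node to query
--         return flatten_list( "/" + sub_str_after_left_bracket, recursion_counter+1, output_list)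
--
--     # Case2 where there is right bracket but no left bracket
--     if count_right_bracket_condition > count_left_bracket_condition:
--         sub_str_after_right_bracket = string[index+1:]
--
--         # pass the remaining sub_str_after_right_bracket into the function
--         # sub_str_after_right_recur_res = recursion_test (sub_str_after_right_bracket)
--         return flatten_list(sub_str_after_right_bracket, recursion_counter+1, output_list)
--
-- def projection_filter_substr(xpath):
--     flatten_list_result = flatten_list(xpath, recursion_counter = 0, output_list = [])
--
--     projection_path = ''
--     filter_path_list = []
--
--     # Add in all the filter conditions
--     for i in flatten_list_result:
--         if ("=" in i) or (">" in i) or ("<" in i) or (">=" in i) or ("<=" in i):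
--             filter_path_list.append(i)
--
--     # Try to form the projection path
--     for i in flatten_list_result:
--         if i[0] == "/" and not (("=" in i) or (">" in i) or ("<" in i) or (">=" in i) or ("<=" in i)):
--             projection_path += i
--
--     return filter_path_list, projection_path
-- ===== SOURCE B (Python) =====
-- def projection_filter_substr(xpath):
--     segs = []
--     seen = set()
--     cur = ''
--
--     def push(s):
--         if s and s not in seen:
--             seen.add(s)
--             segs.append(s)
--
--     for ch in xpath:
--         if ch == '[':
--             push(cur)
--             cur = '/'
--         elif ch == ']':
--             push(cur)
--             cur = ''
--         else:
--             cur += ch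
--     push(cur)
--     ops = ('=', '>', '<')
--     filter_path_list = [s for s in segs if any(o in s for o in ops)]
--     projection_path = ''.join(s for s in segs
--                               if s[0] == '/' and not any(o in s for o in ops))
--     return filter_path_list, projection_path
-- ===== Notes on version B (the rewrite author's own statement) =====
-- stated objective: faster
-- what changed: Replaces A's recursive tail-slicing flatten_list (which copies the remaining string at every bracket and dedups via list membership) with a single left-to-right scan of the string that builds the segments in one pass, using a set for the duplicate check.
import Mathlib
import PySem

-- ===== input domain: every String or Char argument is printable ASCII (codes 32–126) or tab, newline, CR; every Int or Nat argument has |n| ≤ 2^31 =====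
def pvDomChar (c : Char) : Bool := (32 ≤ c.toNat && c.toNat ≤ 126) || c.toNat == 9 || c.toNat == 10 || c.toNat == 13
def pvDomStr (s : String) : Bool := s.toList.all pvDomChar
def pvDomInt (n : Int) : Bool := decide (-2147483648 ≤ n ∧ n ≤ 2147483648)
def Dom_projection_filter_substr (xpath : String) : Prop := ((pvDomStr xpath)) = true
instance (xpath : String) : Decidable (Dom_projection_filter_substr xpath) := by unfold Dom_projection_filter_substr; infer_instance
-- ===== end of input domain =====

-- B replaces A's recursive tail-slicing with one linear scan of the string (objective: faster).

-- ===== PORT A =====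
-- A's for-loop over `string`: accumulate chars into left_sub_str until the first '[' or ']'
-- (the loop's third `if … : break` is dead code — a break always fires first).
-- Returns (left_sub_str, none) if no bracket, else (left_sub_str, some (isLeftBracket, string[index+1:])).
def pvScanA : List Char → List Char × Option (Bool × List Char)
  | [] => ([], none)
  | c :: rest =>
    if c = '[' then ([], some (true, rest))
    else if c = ']' then ([], some (false, rest))
    else
      let p := pvScanA rest
      (c :: p.1, p.2)

-- used by pvFlattenA's termination proof (the port cites it in decreasing_by)
theorem pvScanA_some : ∀ (s : List Char) (b : Bool) (r : List Char),
    (pvScanA s).2 = some (b, r) → s = (pvScanA s).1 ++ (if b then '[' else ']') :: r := by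
  intro s
  induction s with
  | nil => intro b r h; simp [pvScanA] at h
  | cons c rest ih =>
    intro b r h
    by_cases hc : c = '['
    · simp [pvScanA, hc] at h ⊢; obtain ⟨hb, hr⟩ := h; subst hb; subst hr; simp
    · by_cases hc' : c = ']'
      · simp [pvScanA, hc'] at h ⊢; obtain ⟨hb, hr⟩ := h; subst hb; subst hr; simp
      · simp only [pvScanA, if_neg hc, if_neg hc'] at h ⊢
        have := ih b r h
        simpa using congrArg (c :: ·) this

-- flatten_list (the recursion_counter is dead state and omitted; projection_filter_substr
-- always passes a fresh output_list, so the mutable default argument never matters).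
def pvFlattenA (s : List Char) (out : List (List Char)) : List (List Char) :=
  let p := pvScanA s
  let out' := if p.1 ∉ out ∧ p.1 ≠ [] then out ++ [p.1] else out
  match h : p.2 with
  | none => out'
  | some (true, rest) => pvFlattenA ('/' :: rest) out'
  | some (false, rest) => pvFlattenA rest out'
termination_by 2 * s.length + (if s.head? = some '/' then 0 else 1)
decreasing_by
  · have hs := pvScanA_some s true rest h
    rcases hl : (pvScanA s).1 with _ | ⟨a, l'⟩
    · rw [hl] at hs; simp [hs]
    · rw [hl] at hs; subst hs; simp [List.length_append]; split_ifs <;> omega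
  · have hs := pvScanA_some s false rest h
    have : rest.length < s.length := by rw [hs]; simp [List.length_append]; omega
    split_ifs <;> omega

-- ("=" in i) or (">" in i) or ("<" in i) or (">=" in i) or ("<=" in i)
def pvCondA (i : List Char) : Bool :=
  PySem.Chars.isIn ['='] i || PySem.Chars.isIn ['>'] i || PySem.Chars.isIn ['<'] i ||
    PySem.Chars.isIn ['>', '='] i || PySem.Chars.isIn ['<', '='] i

def projection_filter_substr (xpath : String) : List String × String :=
  let segs := pvFlattenA xpath.toList []
  -- first loop: filter_path_list.append(i)
  let filt := segs.foldl (fun acc i => if pvCondA i then acc ++ [i] else acc) []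
  -- second loop: projection_path += i  (i[0] == "/": segments are never empty, so pyGet? returns)
  let proj := segs.foldl
    (fun acc i => if (PySem.List.pyGet? i 0 == some '/') && !pvCondA i then acc ++ i else acc) []
  (filt.map String.mk, String.mk proj)

-- ===== PORT B =====
-- any(o in s for o in ops), ops = ('=', '>', '<')
def pvHasOp (s : List Char) : Bool := ['=', '>', '<'].any (fun o => PySem.Chars.isIn [o] s)

-- push(): s = join(cur); if s and s not in seen: seen.add(s); segs.append(s).  State = (segs, seen).
def pvPushB (st : List (List Char) × PySem.Set (List Char)) (cur : List Char) :
    List (List Char) × PySem.Set (List Char) :=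
  if cur ≠ [] ∧ ¬ PySem.Set.contains st.2 cur then (st.1 ++ [cur], PySem.Set.add st.2 cur) else st

-- the single for-loop over xpath
def pvScanB : List Char → (List (List Char) × PySem.Set (List Char)) → List Char →
    List (List Char) × PySem.Set (List Char)
  | [], st, cur => pvPushB st cur
  | c :: rest, st, cur =>
    if c = '[' then pvScanB rest (pvPushB st cur) ['/']
    else if c = ']' then pvScanB rest (pvPushB st cur) []
    else pvScanB rest st (cur ++ [c])

def projection_filter_substr_alt (xpath : String) : List String × String :=
  let segs := (pvScanB xpath.toList ([], PySem.Set.empty) []).1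
  let filt := segs.filter pvHasOp
  let proj := (segs.filter (fun s => (PySem.List.pyGet? s 0 == some '/') && !pvHasOp s)).flatten
  (filt.map String.mk, String.mk proj)

-- ===== PRECONDITION & SPEC =====
def Spec_projection_filter_substr (xpath : String) (out : List String × String) : Prop := out = projection_filter_substr_alt xpath
instance (xpath : String) (out : List String × String) : Decidable (Spec_projection_filter_substr xpath out) := by unfold Spec_projection_filter_substr; infer_instance

-- ===== CLAIM (what is proved, stated in full; the proofs are below) =====
def Claim_equal_projection_filter_substr : Prop := ∀ (xpath : String), Dom_projection_filter_substr xpath → Spec_projection_filter_substr xpath (projection_filter_substr xpath)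

-- ===== LEMMAS AND PROOFS =====

theorem pvFlattenA_none (s : List Char) (out : List (List Char)) (l : List Char)
    (h : pvScanA s = (l, none)) :
    pvFlattenA s out = if l ∉ out ∧ l ≠ [] then out ++ [l] else out := by
  rw [pvFlattenA]
  split <;> rename_i heq <;> rw [h] at heq <;> simp_all

theorem pvFlattenA_left (s : List Char) (out : List (List Char)) (l rest : List Char)
    (h : pvScanA s = (l, some (true, rest))) :
    pvFlattenA s out = pvFlattenA ('/' :: rest) (if l ∉ out ∧ l ≠ [] then out ++ [l] else out) := by
  rw [pvFlattenA]
  split <;> rename_i heq <;> rw [h] at heq <;> simp_all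

theorem pvFlattenA_right (s : List Char) (out : List (List Char)) (l rest : List Char)
    (h : pvScanA s = (l, some (false, rest))) :
    pvFlattenA s out = pvFlattenA rest (if l ∉ out ∧ l ≠ [] then out ++ [l] else out) := by
  rw [pvFlattenA]
  split <;> rename_i heq <;> rw [h] at heq <;> simp_all

theorem pvScanA_free : ∀ (l : List Char), (∀ c ∈ l, c ≠ '[' ∧ c ≠ ']') → pvScanA l = (l, none) := by
  intro l
  induction l with
  | nil => intro _; rfl
  | cons c rest ih =>
    intro h
    have hc := h c (by simp)
    simp only [pvScanA, if_neg hc.1, if_neg hc.2, ih (fun d hd => h d (by simp [hd]))]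

theorem pvScanA_bracket (cur rest : List Char) (b : Bool)
    (h : ∀ c ∈ cur, c ≠ '[' ∧ c ≠ ']') :
    pvScanA (cur ++ (if b then '[' else ']') :: rest) = (cur, some (b, rest)) := by
  induction cur with
  | nil => cases b <;> simp [pvScanA]
  | cons c l ih =>
    have hc := h c (by simp)
    simp only [List.cons_append, pvScanA, if_neg hc.1, if_neg hc.2,
      ih (fun d hd => h d (by simp [hd]))]

def pvInv (st : List (List Char) × PySem.Set (List Char)) : Prop :=
  ∀ x, x ∈ st.2 ↔ x ∈ st.1

theorem pvPushB_fst (st : List (List Char) × PySem.Set (List Char)) (cur : List Char)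
    (hst : pvInv st) :
    (pvPushB st cur).1 = if cur ∉ st.1 ∧ cur ≠ [] then st.1 ++ [cur] else st.1 := by
  unfold pvPushB
  by_cases hc : cur = []
  · simp [hc]
  · by_cases hin : cur ∈ st.1
    · have h2 : cur ∈ st.2 := (hst cur).mpr hin
      simp [hc, hin, h2]
    · have h2 : cur ∉ st.2 := fun h => hin ((hst cur).mp h)
      simp [hc, hin, h2]

theorem pvPushB_inv (st : List (List Char) × PySem.Set (List Char)) (cur : List Char)
    (hst : pvInv st) : pvInv (pvPushB st cur) := by
  unfold pvPushB
  split_ifs with h1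
  · intro x
    have hc : PySem.Set.contains st.2 cur = false := by
      rcases h1 with ⟨_, h⟩; simpa using h
    simp only [PySem.Set.add, hc, Bool.false_eq_true, if_false]
    simp [hst x]
  · exact hst

theorem pvMain : ∀ (s cur : List Char) (st : List (List Char) × PySem.Set (List Char)),
    (∀ c ∈ cur, c ≠ '[' ∧ c ≠ ']') → pvInv st →
    pvFlattenA (cur ++ s) st.1 = (pvScanB s st cur).1 := by
  intro s
  induction s with
  | nil =>
    intro cur st hcur hst
    rw [List.append_nil, pvFlattenA_none cur st.1 cur (pvScanA_free cur hcur),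
      pvScanB, pvPushB_fst st cur hst]
  | cons c rest ih =>
    intro cur st hcur hst
    by_cases hc : c = '['
    · subst hc
      have hsc : pvScanA (cur ++ '[' :: rest) = (cur, some (true, rest)) := by
        simpa using pvScanA_bracket cur rest true hcur
      rw [pvFlattenA_left _ st.1 cur rest hsc, pvScanB, if_pos rfl,
        ← pvPushB_fst st cur hst]
      have h2 := ih ['/'] (pvPushB st cur) (by intro d hd; simp at hd; subst hd; exact ⟨by decide, by decide⟩) (pvPushB_inv st cur hst)
      simpa using h2
    · by_cases hc' : c = ']'
      · subst hc'
        have hsc : pvScanA (cur ++ ']' :: rest) = (cur, some (false, rest)) := by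
          simpa using pvScanA_bracket cur rest false hcur
        rw [pvFlattenA_right _ st.1 cur rest hsc, pvScanB,
          if_neg (by decide : ¬ (']' = '[')), if_pos rfl, ← pvPushB_fst st cur hst]
        have h2 := ih [] (pvPushB st cur) (by simp) (pvPushB_inv st cur hst)
        simpa using h2
      · rw [pvScanB]
        simp only [if_neg hc, if_neg hc']
        have h2 := ih (cur ++ [c]) st
          (by intro d hd
              rcases List.mem_append.mp hd with h | h
              · exact hcur d h
              · simp at h; subst h; exact ⟨hc, hc'⟩) hst
        rw [← h2]; simp

theorem pvSingleton_infix (c : Char) (s : List Char) : [c] <:+: s ↔ c ∈ s := by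
  constructor
  · intro h; exact h.subset (by simp)
  · intro h
    obtain ⟨u, v, rfl⟩ := List.append_of_mem h
    exact ⟨u, v, by simp⟩

theorem pvCond_eq (i : List Char) : pvCondA i = pvHasOp i := by
  unfold pvCondA pvHasOp
  by_cases hm : '=' ∈ i
  · have h1 : PySem.Chars.isIn ['='] i = true :=
      (PySem.Chars.isIn_iff_infix ['='] i).mpr ((pvSingleton_infix '=' i).mpr hm)
    simp [h1, List.any]
  · have h1 : PySem.Chars.isIn ['='] i = false := by
      rw [PySem.Chars.isIn_eq_false_iff]
      exact fun h => hm ((pvSingleton_infix '=' i).mp h)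
    have hx : PySem.Chars.isIn ['>', '='] i = false := by
      rw [PySem.Chars.isIn_eq_false_iff]
      exact fun h => hm (h.subset (by simp))
    have hy : PySem.Chars.isIn ['<', '='] i = false := by
      rw [PySem.Chars.isIn_eq_false_iff]
      exact fun h => hm (h.subset (by simp))
    simp [h1, hx, hy, List.any]

theorem pvFlatten_if (p : List Char → Bool) :
    ∀ (l : List (List Char)) (acc : List Char),
    l.foldl (fun acc i => if p i then acc ++ i else acc) acc = acc ++ (l.filter p).flatten := by
  intro l
  induction l with
  | nil => intro acc; simp
  | cons x xs ih =>
    intro acc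
    by_cases hx : p x
    · simp [List.foldl, hx, ih, List.append_assoc]
    · simp [List.foldl, hx, ih]

-- ===== VERDICT (by name: the statement is the Claim_ definition above) =====
theorem projection_filter_substr_spec : Claim_equal_projection_filter_substr := by
  intro xpath _
  unfold Spec_projection_filter_substr projection_filter_substr projection_filter_substr_alt
  have hsegs : pvFlattenA xpath.toList [] = (pvScanB xpath.toList ([], PySem.Set.empty) []).1 := by
    have := pvMain xpath.toList [] ([], PySem.Set.empty) (by simp)
      (by intro x; simp [PySem.Set.empty])
    simpa using this
  dsimp only
  rw [← hsegs]
  have hfilt : List.filter pvHasOp (pvFlattenA xpath.toList []) =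
      List.filter pvCondA (pvFlattenA xpath.toList []) :=
    (List.filter_congr (fun x _ => (pvCond_eq x).symm))
  have hproj : List.filter (fun s => (PySem.List.pyGet? s 0 == some '/') && !pvHasOp s)
        (pvFlattenA xpath.toList []) =
      List.filter (fun s => (PySem.List.pyGet? s 0 == some '/') && !pvCondA s)
        (pvFlattenA xpath.toList []) :=
    (List.filter_congr (fun x _ => by rw [pvCond_eq x]))
  rw [hfilt, hproj, PySem.List.foldl_append_if_eq_filter, pvFlatten_if]
  simp
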